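-- pv_equiv track=rewrite | github.com/epfl-ada/ada-2021-project-teamphilippe | helper/wikidata.py | set_academic_degree
-- ===== SOURCE A (Python) =====
-- def set_academic_degree(row):
--   if(str(row) == 'None'):
--     return None
--   result =  set()
--   for element in row:
--     e = element.lower()
--     if('bachelor' in e or
--         e.startswith('bsc') or
--        'licence' in e  or
--        'law degree' in e or
--        'political science' in e):
--       e = 'Bachelor'
--     elif('candidate' in e or
--           'candidatus' in e or
--           'cand.' in e):
--       e = 'Candidate'
--     elif('doctor' in e or
--         'doktor' in e or
--         'phd' in e or
--         'dr.' in e):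
--       e = 'Doctor'
--     elif('master' in e or
--         'laurea' in e or
--         e.startswith('ma') or
--         'msc' in e or
--         'health professional degree' in e or
--         'aggregation of modern literature' in e):
--       e = 'Master'
--     elif('professor' in e):
--       e = 'Professor'
--     else:
--       e = 'Other'
--     result.add(e)
--   return result if len(result) > 0 else None
-- ===== SOURCE B (Python) =====
-- RULES = [
--     ('Bachelor', lambda e: 'bachelor' in e or e.startswith('bsc') or 'licence' in e
--                  or 'law degree' in e or 'political science' in e),
--     ('Candidate', lambda e: 'candidate' in e or 'candidatus' in e or 'cand.' in e),
--     ('Doctor', lambda e: 'doctor' in e or 'doktor' in e or 'phd' in e or 'dr.' in e),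
--     ('Master', lambda e: 'master' in e or 'laurea' in e or e.startswith('ma') or 'msc' in e
--                or 'health professional degree' in e or 'aggregation of modern literature' in e),
--     ('Professor', lambda e: 'professor' in e),
-- ]
--
--
-- def set_academic_degree(row):
--     # Staged, category-outer labelling: one pass over the row per category,
--     # labelling the still-unlabelled elements; leftovers become 'Other'.
--     if str(row) == 'None':
--         return None
--     cells = [(x.lower(), None) for x in row]
--     for cat, pred in RULES:
--         cells = [(e, lab if lab is not None else (cat if pred(e) else None))
--                  for (e, lab) in cells]
--     result = {lab if lab is not None else 'Other' for (_, lab) in cells}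
--     return result if result else None
-- ===== Notes on version B (the rewrite author's own statement) =====
-- stated objective: alternative
-- what changed: Flips the loop nesting: instead of A's single element-wise pass with an inline if/elif ladder, B makes one staged pass over the row per category in priority order, labelling still-unlabelled elements, and finally collects labels (defaulting 'Other') into the set.
import Mathlib
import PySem

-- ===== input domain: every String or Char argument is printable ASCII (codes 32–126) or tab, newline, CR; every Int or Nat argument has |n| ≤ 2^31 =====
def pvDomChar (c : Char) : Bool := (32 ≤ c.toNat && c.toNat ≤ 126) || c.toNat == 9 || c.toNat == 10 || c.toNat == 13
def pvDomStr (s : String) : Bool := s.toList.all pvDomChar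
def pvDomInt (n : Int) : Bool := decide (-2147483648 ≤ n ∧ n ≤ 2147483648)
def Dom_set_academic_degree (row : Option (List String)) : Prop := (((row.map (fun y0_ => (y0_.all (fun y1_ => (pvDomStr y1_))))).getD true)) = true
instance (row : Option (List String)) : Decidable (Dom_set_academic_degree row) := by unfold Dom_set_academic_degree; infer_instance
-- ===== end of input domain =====

-- B flips the loop nesting: one staged pass over the row per category (priority order),
-- labelling still-unlabelled elements, then collects labels into the set; objective: alternative.

-- ===== PORT A =====
-- literal transliteration of A: loop over row, if/elif ladder inline, add to a set
def set_academic_degree (row : Option (List String)) : Option (List String) :=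
  match row with
  | none => none
  | some xs =>
      let result := xs.foldl (fun result element =>
        let e := PySem.Str.lower element
        let e :=
          if PySem.Str.isIn "bachelor" e || PySem.Str.startswith e "bsc" ||
             PySem.Str.isIn "licence" e || PySem.Str.isIn "law degree" e ||
             PySem.Str.isIn "political science" e then "Bachelor"
          else if PySem.Str.isIn "candidate" e || PySem.Str.isIn "candidatus" e ||
                  PySem.Str.isIn "cand." e then "Candidate"
          else if PySem.Str.isIn "doctor" e || PySem.Str.isIn "doktor" e ||
                  PySem.Str.isIn "phd" e || PySem.Str.isIn "dr." e then "Doctor"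
          else if PySem.Str.isIn "master" e || PySem.Str.isIn "laurea" e ||
                  PySem.Str.startswith e "ma" || PySem.Str.isIn "msc" e ||
                  PySem.Str.isIn "health professional degree" e ||
                  PySem.Str.isIn "aggregation of modern literature" e then "Master"
          else if PySem.Str.isIn "professor" e then "Professor"
          else "Other"
        PySem.Set.add result e) PySem.Set.empty
      if PySem.Set.len result > 0 then some result else none

-- ===== PORT B =====
-- the ordered list of (category, predicate-on-lowercased-element) rules from Source B
def pvRules : List (String × (String → Bool)) :=
  [("Bachelor", fun e => PySem.Str.isIn "bachelor" e || PySem.Str.startswith e "bsc" ||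
       PySem.Str.isIn "licence" e || PySem.Str.isIn "law degree" e ||
       PySem.Str.isIn "political science" e),
   ("Candidate", fun e => PySem.Str.isIn "candidate" e || PySem.Str.isIn "candidatus" e ||
       PySem.Str.isIn "cand." e),
   ("Doctor", fun e => PySem.Str.isIn "doctor" e || PySem.Str.isIn "doktor" e ||
       PySem.Str.isIn "phd" e || PySem.Str.isIn "dr." e),
   ("Master", fun e => PySem.Str.isIn "master" e || PySem.Str.isIn "laurea" e ||
       PySem.Str.startswith e "ma" || PySem.Str.isIn "msc" e ||
       PySem.Str.isIn "health professional degree" e ||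
       PySem.Str.isIn "aggregation of modern literature" e),
   ("Professor", fun e => PySem.Str.isIn "professor" e)]

-- one stage's per-cell update: label a still-unlabelled cell if the predicate matches
def pvStep (r : String × (String → Bool)) (c : String × Option String) : String × Option String :=
  match c.2 with
  | some _ => c
  | none => if r.2 c.1 then (c.1, some r.1) else c

def set_academic_degree_alt (row : Option (List String)) : Option (List String) :=
  match row with
  | none => none
  | some xs =>
      let cells := xs.map (fun x => (PySem.Str.lower x, (none : Option String)))
      let cells := pvRules.foldl (fun cs r => cs.map (fun c => pvStep r c)) cells
      let result := PySem.Set.ofList (cells.map (fun c => c.2.getD "Other"))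
      if result = [] then none else some result

-- ===== PRECONDITION & SPEC =====
def Spec_set_academic_degree (row : Option (List String)) (out : Option (List String)) : Prop := out = set_academic_degree_alt row
instance (row : Option (List String)) (out : Option (List String)) : Decidable (Spec_set_academic_degree row out) := by unfold Spec_set_academic_degree; infer_instance

-- ===== CLAIM =====
def Claim_equal_set_academic_degree : Prop := ∀ (row : Option (List String)), Dom_set_academic_degree row → Spec_set_academic_degree row (set_academic_degree row)

-- ===== LEMMAS AND PROOFS =====

-- B's per-element label after all five stages, with the 'Other' default applied
def pvFoldLabel (element : String) : String :=
  ((pvRules.foldl (fun c r => pvStep r c) (PySem.Str.lower element, none)).2).getD "Other"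

-- the staged fold over the whole cell list is the per-cell fold, mapped
lemma stages_eq_map (rules : List (String × (String → Bool)))
    (cells : List (String × Option String)) :
    rules.foldl (fun cs r => cs.map (fun c => pvStep r c)) cells
      = cells.map (fun c => rules.foldl (fun c r => pvStep r c) c) := by
  induction rules generalizing cells with
  | nil => simp
  | cons r rs ih =>
      simp only [List.foldl_cons]
      rw [ih, List.map_map]
      rfl

-- the staged per-cell fold labels a cell with the first rule whose predicate matches
lemma foldStep_eq_find (rules : List (String × (String → Bool))) (e : String) :
    rules.foldl (fun c r => pvStep r c) (e, (none : Option String))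
      = (e, (rules.find? (fun r => r.2 e)).map Prod.fst) := by
  induction rules with
  | nil => rfl
  | cons r rs ih =>
      simp only [List.foldl_cons, List.find?]
      by_cases h : r.2 e = true
      · simp only [h, pvStep, if_pos]
        clear ih
        induction rs with
        | nil => rfl
        | cons r' rs' ih' => simpa [pvStep] using ih'
      · simp only [Bool.not_eq_true] at h
        simpa [pvStep, h] using ih

-- A's inline ladder computes the same category as B's staged per-cell fold
lemma ladder_eq_foldLabel (element : String) :
    (let e := PySem.Str.lower element
     if PySem.Str.isIn "bachelor" e || PySem.Str.startswith e "bsc" ||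
        PySem.Str.isIn "licence" e || PySem.Str.isIn "law degree" e ||
        PySem.Str.isIn "political science" e then "Bachelor"
     else if PySem.Str.isIn "candidate" e || PySem.Str.isIn "candidatus" e ||
             PySem.Str.isIn "cand." e then "Candidate"
     else if PySem.Str.isIn "doctor" e || PySem.Str.isIn "doktor" e ||
             PySem.Str.isIn "phd" e || PySem.Str.isIn "dr." e then "Doctor"
     else if PySem.Str.isIn "master" e || PySem.Str.isIn "laurea" e ||
             PySem.Str.startswith e "ma" || PySem.Str.isIn "msc" e ||
             PySem.Str.isIn "health professional degree" e ||
             PySem.Str.isIn "aggregation of modern literature" e then "Master"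
     else if PySem.Str.isIn "professor" e then "Professor"
     else "Other") = pvFoldLabel element := by
  unfold pvFoldLabel
  rw [foldStep_eq_find]
  unfold pvRules
  simp only [List.find?]
  split_ifs <;> simp_all only [Bool.not_eq_true] <;> rfl

-- A's fold (add the ladder's category) equals folding add over the per-element labels
lemma fold_eq (xs : List String) (acc : PySem.Set String) :
    xs.foldl (fun result element =>
        let e := PySem.Str.lower element
        let e :=
          if PySem.Str.isIn "bachelor" e || PySem.Str.startswith e "bsc" ||
             PySem.Str.isIn "licence" e || PySem.Str.isIn "law degree" e ||
             PySem.Str.isIn "political science" e then "Bachelor"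
          else if PySem.Str.isIn "candidate" e || PySem.Str.isIn "candidatus" e ||
                  PySem.Str.isIn "cand." e then "Candidate"
          else if PySem.Str.isIn "doctor" e || PySem.Str.isIn "doktor" e ||
                  PySem.Str.isIn "phd" e || PySem.Str.isIn "dr." e then "Doctor"
          else if PySem.Str.isIn "master" e || PySem.Str.isIn "laurea" e ||
                  PySem.Str.startswith e "ma" || PySem.Str.isIn "msc" e ||
                  PySem.Str.isIn "health professional degree" e ||
                  PySem.Str.isIn "aggregation of modern literature" e then "Master"
          else if PySem.Str.isIn "professor" e then "Professor"
          else "Other"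
        PySem.Set.add result e) acc
    = xs.foldl (fun result element => PySem.Set.add result (pvFoldLabel element)) acc := by
  induction xs generalizing acc with
  | nil => rfl
  | cons x xs ih =>
      simp only [List.foldl_cons]
      rw [← ladder_eq_foldLabel x]
      exact ih _

-- the two emptiness tests agree: len s > 0 ? some s : none  =  s = [] ? none : some s
lemma len_pos_ite (s : PySem.Set String) :
    (if PySem.Set.len s > 0 then some s else none) = (if s = [] then none else some s) := by
  cases s <;> simp [PySem.Set.len]

-- ===== VERDICT =====
set_option maxHeartbeats 1000000 in
theorem set_academic_degree_spec : Claim_equal_set_academic_degree := by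
  intro row _
  unfold Spec_set_academic_degree
  cases row with
  | none => rfl
  | some xs =>
      simp only [set_academic_degree, set_academic_degree_alt, stages_eq_map,
        List.map_map, PySem.Set.ofList_eq_foldl, List.foldl_map, PySem.Set.empty]
      rw [fold_eq]
      · exact len_pos_ite _
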